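-- pv_equiv track=rewrite | github.com/Livioni/Cloud-Workflow-Scheduling-base-on-Deep-Reinforcement-Learning | function.py | search_for_successors
-- ===== SOURCE A (Python) =====
-- def search_for_successors(node,edges):
--     map = {}
--     for i in range(len(edges)):
--         if edges[i][1] in map.keys():
--             map[edges[i][1]].append(edges[i][0])
--         else:
--             map[edges[i][1]] = [edges[i][0]]
--     succ = map[node]
--     return succ
-- ===== SOURCE B (Python) =====
-- def search_for_successors(node, edges):
--     preds = [e[0] for e in edges if e[1] == node]
--     if not preds:
--         raise KeyError(node)
--     return preds
-- ===== Notes on version B (the rewrite author's own statement) =====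
-- stated objective: simpler
-- what changed: B replaces the full target->sources dictionary build with a single filtered list comprehension collecting e[0] for edges whose target equals node, raising KeyError(node) when no edge matches just as A's final lookup does.
import Mathlib
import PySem

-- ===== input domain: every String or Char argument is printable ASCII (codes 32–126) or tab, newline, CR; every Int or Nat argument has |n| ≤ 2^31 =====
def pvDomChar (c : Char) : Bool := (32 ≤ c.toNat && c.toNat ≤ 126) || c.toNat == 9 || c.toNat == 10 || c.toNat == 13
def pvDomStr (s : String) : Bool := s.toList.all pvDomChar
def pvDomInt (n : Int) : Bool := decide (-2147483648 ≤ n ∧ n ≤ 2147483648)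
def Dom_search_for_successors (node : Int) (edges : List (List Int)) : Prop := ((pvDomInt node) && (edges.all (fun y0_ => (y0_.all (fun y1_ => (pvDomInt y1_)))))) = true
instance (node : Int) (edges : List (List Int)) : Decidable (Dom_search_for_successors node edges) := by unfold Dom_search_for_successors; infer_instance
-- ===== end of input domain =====

-- B builds the answer by a single filtered pass instead of A's full target→sources dictionary; same cost, simpler.

-- ===== PORT A =====
-- literal port: the dict-building loop over range(len(edges)); pyGetD defaults are only
-- reached where Python raises (short edges / missing key), which Pre_ excludes.
-- one iteration of A's loop body on edge e = edges[i]
def pvStepA (m : PySem.Dict Int (List Int)) (e : List Int) : PySem.Dict Int (List Int) :=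
  if m.contains (PySem.List.pyGetD e 1 0) then
    m.insert (PySem.List.pyGetD e 1 0) (m.getD (PySem.List.pyGetD e 1 0) [] ++ [PySem.List.pyGetD e 0 0])
  else
    m.insert (PySem.List.pyGetD e 1 0) [PySem.List.pyGetD e 0 0]

def search_for_successors (node : Int) (edges : List (List Int)) : List Int :=
  ((PySem.List.pyRange 0 (PySem.List.len edges)).foldl
    (fun m i => pvStepA m (PySem.List.pyGetD edges i [])) PySem.Dict.empty).getD node []

-- ===== PORT B =====
-- literal port of B: the filtered comprehension; B's KeyError on an empty result is
-- unreachable inside Pre_ (node occurs as a target), so the port returns the list.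
def search_for_successors_alt (node : Int) (edges : List (List Int)) : List Int :=
  edges.foldl (fun acc e =>
    if PySem.List.pyGetD e 1 0 == node then acc ++ [PySem.List.pyGetD e 0 0] else acc) []

-- ===== PRECONDITION & SPEC =====
-- Pre_ is exactly where Python A returns: every edge has ≥ 2 entries (else IndexError)
-- and node occurs as some target e[1] (else KeyError at the final map[node]).
def Pre_search_for_successors (node : Int) (edges : List (List Int)) : Prop :=
  (∀ e ∈ edges, 2 ≤ e.length) ∧ node ∈ edges.map (fun e => e.getD 1 0)
instance (node : Int) (edges : List (List Int)) : Decidable (Pre_search_for_successors node edges) := by unfold Pre_search_for_successors; infer_instance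

def pvWitness_search_for_successors : Int × List (List Int) := (2, [[1, 2], [3, 2], [4, 5]])

def Spec_search_for_successors (node : Int) (edges : List (List Int)) (out : List Int) : Prop := out = search_for_successors_alt node edges
instance (node : Int) (edges : List (List Int)) (out : List Int) : Decidable (Spec_search_for_successors node edges out) := by unfold Spec_search_for_successors; infer_instance

-- ===== CLAIM (what is proved, stated in full; the proofs are below) =====
def Claim_equal_search_for_successors : Prop := ∀ (node : Int) (edges : List (List Int)), Dom_search_for_successors node edges → Pre_search_for_successors node edges → Spec_search_for_successors node edges (search_for_successors node edges)

-- ===== LEMMAS AND PROOFS =====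

-- A's if/contains/append-else-insert step is exactly Dict.modify with default [].
theorem step_eq_modify (m : PySem.Dict Int (List Int)) (t s : Int) :
    (if m.contains t then m.insert t (m.getD t [] ++ [s]) else m.insert t [s]) =
      m.modify t [] (· ++ [s]) := by
  by_cases h : m.contains t = true
  · simp [h, PySem.Dict.modify]
  · rw [if_neg h]
    simp [PySem.Dict.modify,
      PySem.Dict.getD_of_not_contains m ([] : List Int) (by simpa using h)]

-- characterisation of A's dictionary lookup: it is the filtered pass.
theorem portA_eq (node : Int) (edges : List (List Int)) :
    search_for_successors node edges =
      ((edges.filter (fun e => PySem.List.pyGetD e 1 0 == node)).map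
        (fun e => PySem.List.pyGetD e 0 0)) := by
  unfold search_for_successors
  rw [PySem.List.foldl_pyRange_pyGetD edges [] pvStepA PySem.Dict.empty le_rfl]
  simp only [Int.toNat_zero, List.drop_zero]
  have hstep : edges.foldl pvStepA PySem.Dict.empty
    = (edges.map (fun e => (PySem.List.pyGetD e 1 0, PySem.List.pyGetD e 0 0))).foldl
        (fun d p => d.modify p.1 [] (· ++ [p.2])) PySem.Dict.empty := by
    rw [List.foldl_map]
    exact PySem.List.foldl_congr_mem edges pvStepA
      (fun m e => m.modify (PySem.List.pyGetD e 1 0) [] (· ++ [PySem.List.pyGetD e 0 0]))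
      PySem.Dict.empty (fun m e _ => by unfold pvStepA; exact step_eq_modify m _ _)
  rw [hstep, PySem.Dict.getD_foldl_modify_append]
  simp [List.filter_map, List.map_map, Function.comp_def]

theorem portB_eq (node : Int) (edges : List (List Int)) :
    search_for_successors_alt node edges =
      ((edges.filter (fun e => PySem.List.pyGetD e 1 0 == node)).map
        (fun e => PySem.List.pyGetD e 0 0)) := by
  unfold search_for_successors_alt
  rw [PySem.List.foldl_append_if]
  simp

-- ===== VERDICT (by name: the statement is the Claim_ definition above) =====
theorem search_for_successors_spec : Claim_equal_search_for_successors := by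
  intro node edges _ _
  unfold Spec_search_for_successors
  rw [portA_eq, portB_eq]
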